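-- pv_equiv track=rewrite | github.com/MatejPapac/Schedule | backend/app/utils/test_ga.py | get_reconstructed_schedule
-- ===== SOURCE A (Python) =====
-- def get_reconstructed_schedule(schedule, shifts):
--     result = {}
--
--     position_idx = 0
--     for shift_idx, shift in enumerate(shifts):
--         for _ in range(shift['required_staff']):
--             employee_id = schedule[position_idx]
--             if employee_id is not None:
--                 if employee_id not in result:
--                     result[employee_id] = []
--                 result[employee_id].append(shift['id'])
--             position_idx += 1
--
--     return result
-- ===== SOURCE B (Python) =====
-- def get_reconstructed_schedule(schedule, shifts):
--     # group-by-key formulation: list the slots' shift IDs, collect the distinct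
--     # assigned employees in first-appearance order, then build each employee's
--     # list by filtering the (slot, id) table for that employee.
--     ids = [s['id'] for s in shifts for _ in range(s['required_staff'])]
--     emps = []
--     for e in schedule[:len(ids)]:
--         if e is not None and e not in emps:
--             emps.append(e)
--     return {e: [sid for e2, sid in zip(schedule, ids) if e2 == e] for e in emps}
-- ===== Notes on version B (the rewrite author's own statement) =====
-- stated objective: alternative
-- what changed: Replaces A's single mutable-dict accumulation loop with a running position counter by a group-by formulation: build the flat slot-to-shift-id table, collect the distinct assigned employees in first-appearance order, then compute each employee's list as a filter of the zipped (slot, id) table.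
-- outside the precondition, e.g. on get_reconstructed_schedule([None], [{'required_staff': 1}]): A returns {}, B raises KeyError
import Mathlib
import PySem

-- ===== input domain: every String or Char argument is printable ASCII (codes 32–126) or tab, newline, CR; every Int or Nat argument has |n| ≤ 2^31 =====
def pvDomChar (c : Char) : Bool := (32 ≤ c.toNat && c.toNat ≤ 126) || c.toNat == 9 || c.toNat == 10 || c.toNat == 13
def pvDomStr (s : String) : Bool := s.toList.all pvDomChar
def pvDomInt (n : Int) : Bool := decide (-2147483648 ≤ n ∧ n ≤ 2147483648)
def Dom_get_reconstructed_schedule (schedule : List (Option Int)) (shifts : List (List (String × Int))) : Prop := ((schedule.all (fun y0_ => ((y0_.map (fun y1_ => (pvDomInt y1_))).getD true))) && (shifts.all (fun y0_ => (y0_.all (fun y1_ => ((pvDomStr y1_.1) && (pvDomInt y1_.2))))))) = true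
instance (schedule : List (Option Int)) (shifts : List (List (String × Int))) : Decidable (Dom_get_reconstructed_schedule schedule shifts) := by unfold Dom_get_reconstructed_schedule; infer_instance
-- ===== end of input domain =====

-- B trades A's single dict-accumulation loop (mutable dict + running position counter) for a
-- group-by-key formulation: the distinct employees in first-appearance order, each paired with
-- a filter of the (slot, shift-id) table (objective: alternative; not claimed faster).

-- ===== PORT A =====
-- body of A's inner 'if employee_id is not None: …' plus 'position_idx += 1'
def grsA_step (schedule : List (Option Int)) (sid : Int)
    (st : PySem.Dict Int (List Int) × Int) : PySem.Dict Int (List Int) × Int :=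
  match PySem.List.pyGetD schedule st.2 none with
  | some e =>
      ((if st.1.contains e then st.1 else st.1.insert e ([] : List Int)).modify e [] (· ++ [sid]),
       st.2 + 1)
  | none => (st.1, st.2 + 1)

def get_reconstructed_schedule (schedule : List (Option Int)) (shifts : List (List (String × Int))) : List (Int × List Int) :=
  (shifts.foldl
    (fun st shift =>
      let d := PySem.Dict.ofList shift
      (PySem.List.pyRange 0 (d.getD "required_staff" 0) 1).foldl
        (fun st _ => grsA_step schedule (d.getD "id" 0) st) st)
    ((PySem.Dict.empty : PySem.Dict Int (List Int)), (0 : Int))).1.items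

-- ===== PORT B =====
-- B's table 'ids': the comprehension [s['id'] for s in shifts for _ in range(s['required_staff'])]
def pvIds (shifts : List (List (String × Int))) : List Int :=
  shifts.flatMap (fun s =>
    let d := PySem.Dict.ofList s
    (PySem.List.pyRange 0 (d.getD "required_staff" 0) 1).map (fun _ => d.getD "id" 0))

def get_reconstructed_schedule_alt (schedule : List (Option Int)) (shifts : List (List (String × Int))) : List (Int × List Int) :=
  let ids := pvIds shifts
  let emps : List Int :=
    (PySem.List.slice schedule none (some (ids.length : Int))).foldl
      (fun emps e =>
        match e with
        | some v => if emps.contains v then emps else emps ++ [v]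
        | none => emps) []
  emps.map (fun e => (e, ((schedule.zip ids).filter (fun p => p.1 == some e)).map (·.2)))

-- ===== PRECONDITION & SPEC =====
-- Pre_ excludes exactly the inputs where a Python raises: a shift missing the
-- 'required_staff' key, or missing the 'id' key while asking for staff (KeyError; A reads
-- 'id' lazily, so A still returns {} when every slot of such a shift is None — B raises
-- there), and a schedule shorter than the total required staff (IndexError in A).
def Pre_get_reconstructed_schedule (schedule : List (Option Int)) (shifts : List (List (String × Int))) : Prop :=
  (∀ shift ∈ shifts, (PySem.Dict.ofList shift).contains "required_staff" = true ∧
      (0 < (PySem.Dict.ofList shift).getD "required_staff" 0 →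
        (PySem.Dict.ofList shift).contains "id" = true)) ∧
  (shifts.map (fun s => ((PySem.Dict.ofList s).getD "required_staff" 0).toNat)).sum ≤ schedule.length
instance (schedule : List (Option Int)) (shifts : List (List (String × Int))) : Decidable (Pre_get_reconstructed_schedule schedule shifts) := by unfold Pre_get_reconstructed_schedule; infer_instance

def pvWitness_get_reconstructed_schedule : List (Option Int) × (List (List (String × Int))) :=
  ([some 1, none, some 1], [[("id", 10), ("required_staff", 2)], [("id", 20), ("required_staff", 1)]])

def Spec_get_reconstructed_schedule (schedule : List (Option Int)) (shifts : List (List (String × Int))) (out : List (Int × List Int)) : Prop := out = get_reconstructed_schedule_alt schedule shifts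
instance (schedule : List (Option Int)) (shifts : List (List (String × Int))) (out : List (Int × List Int)) : Decidable (Spec_get_reconstructed_schedule schedule shifts out) := by unfold Spec_get_reconstructed_schedule; infer_instance

-- ===== CLAIM (what is proved, stated in full; the proofs are below) =====
def Claim_equal_get_reconstructed_schedule : Prop := ∀ (schedule : List (Option Int)) (shifts : List (List (String × Int))), Dom_get_reconstructed_schedule schedule shifts → Pre_get_reconstructed_schedule schedule shifts → Spec_get_reconstructed_schedule schedule shifts (get_reconstructed_schedule schedule shifts)

-- ===== LEMMAS AND PROOFS =====

-- pvLift turns a (schedule entry, shift id) pair into its dict action, dropping the Nones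
def pvLift (p : Option Int × Int) : Option (Int × Int) := p.1.map (fun e => (e, p.2))

-- A's dict accumulation, with the position bookkeeping stripped
def grsF (d : PySem.Dict Int (List Int)) (l : List (Int × Int)) : PySem.Dict Int (List Int) :=
  l.foldl (fun d p =>
    (if d.contains p.1 then d else d.insert p.1 ([] : List Int)).modify p.1 [] (· ++ [p.2])) d

-- A's outer double loop = one fold of grsA_step over the flat id table
theorem grsA_outer (schedule : List (Option Int)) (shifts : List (List (String × Int)))
    (st : PySem.Dict Int (List Int) × Int) :
    shifts.foldl
        (fun st shift =>
          let d := PySem.Dict.ofList shift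
          (PySem.List.pyRange 0 (d.getD "required_staff" 0) 1).foldl
            (fun st _ => grsA_step schedule (d.getD "id" 0) st) st) st
      = (pvIds shifts).foldl (fun st sid => grsA_step schedule sid st) st := by
  induction shifts generalizing st with
  | nil => rfl
  | cons s rest ih =>
      rw [List.foldl_cons, ih]
      simp only [pvIds, List.flatMap_cons, List.foldl_append, List.foldl_map]

-- one step of grsF : keys
theorem grsF_step_keys (d : PySem.Dict Int (List Int)) (e sid : Int) :
    ((if d.contains e then d else d.insert e ([] : List Int)).modify e [] (· ++ [sid])).keys
      = PySem.Set.add d.keys e := by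
  by_cases h : d.contains e = true
  · rw [if_pos h, PySem.Dict.keys_modify, PySem.Dict.keys_insert_of_contains _ _ h,
        PySem.Set.add_of_mem]
    exact (PySem.Dict.contains_iff_mem_keys d e).mp h
  · rw [if_neg h, PySem.Dict.keys_modify, PySem.Dict.insert_insert_self,
        PySem.Dict.keys_insert_of_not_contains _ _ (by simpa using h),
        PySem.Set.add_of_not_mem]
    exact fun hm => h ((PySem.Dict.contains_iff_mem_keys d e).mpr hm)

-- one step of grsF : lookups
theorem grsF_step_getD (d : PySem.Dict Int (List Int)) (e sid c : Int) :
    ((if d.contains e then d else d.insert e ([] : List Int)).modify e [] (· ++ [sid])).getD c []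
      = if c = e then d.getD c [] ++ [sid] else d.getD c [] := by
  by_cases h : d.contains e = true
  · rw [if_pos h, PySem.Dict.getD_modify]
    by_cases hc : c = e
    · simp [hc]
    · simp [hc]
  · rw [if_neg h, PySem.Dict.getD_modify]
    by_cases hc : c = e
    · subst hc
      rw [if_pos rfl, if_pos rfl, PySem.Dict.getD_insert_self,
          PySem.Dict.getD_of_not_contains d [] (by simpa using h)]
    · rw [if_neg hc, if_neg hc, PySem.Dict.getD_insert_of_ne _ _ _ hc]

theorem grsF_keys (l : List (Int × Int)) (d : PySem.Dict Int (List Int)) :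
    (grsF d l).keys = PySem.Set.update d.keys (l.map (·.1)) := by
  induction l generalizing d with
  | nil => rfl
  | cons p rest ih =>
      rw [grsF, List.foldl_cons, ← grsF, ih, grsF_step_keys, List.map_cons,
          PySem.Set.update_cons]

theorem grsF_getD (l : List (Int × Int)) (d : PySem.Dict Int (List Int)) (c : Int) :
    (grsF d l).getD c [] = d.getD c [] ++ (l.filter (·.1 == c)).map (·.2) := by
  induction l generalizing d with
  | nil => simp [grsF]
  | cons p rest ih =>
      rw [grsF, List.foldl_cons, ← grsF, ih, grsF_step_getD]
      by_cases hc : c = p.1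
      · simp [hc]
      · simp [hc, Ne.symm hc]

-- A's flat pass over positions k, k+1, … = grsF over the zipped, lifted pair list
theorem grsA_flat (schedule : List (Option Int)) (xs : List Int) (k : Nat)
    (d : PySem.Dict Int (List Int)) (h : k + xs.length ≤ schedule.length) :
    xs.foldl (fun st sid => grsA_step schedule sid st) (d, (k : Int))
      = (grsF d (((schedule.drop k).zip xs).filterMap pvLift), ((k + xs.length : Nat) : Int)) := by
  induction xs generalizing k d with
  | nil => simp [grsF]
  | cons x xs ih =>
      have hk : k < schedule.length := by simp at h; omega
      have hdrop : schedule.drop k = schedule[k] :: schedule.drop (k + 1) :=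
        (List.getElem_cons_drop hk).symm
      have hget : PySem.List.pyGetD schedule (k : Int) none = schedule[k] := by
        rw [PySem.List.pyGetD_eq_getElem schedule none (by positivity) (by exact_mod_cast hk)]
        simp
      rw [List.foldl_cons, hdrop]
      cases hsk : schedule[k] with
      | none =>
          have hstep : grsA_step schedule x (d, (k : Int)) = (d, ((k + 1 : Nat) : Int)) := by
            unfold grsA_step
            rw [hget, hsk]
            simp
          rw [hstep, ih (k + 1) d (by simp at h ⊢; omega)]
          have hlift : pvLift (none, x) = none := rfl
          simp only [List.zip_cons_cons, List.filterMap_cons, hlift]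
          refine congrArg₂ Prod.mk rfl ?_
          simp only [List.length_cons]
          push_cast
          ring
      | some e =>
          have hstep : grsA_step schedule x (d, (k : Int))
              = ((if d.contains e then d else d.insert e ([] : List Int)).modify e [] (· ++ [x]),
                 ((k + 1 : Nat) : Int)) := by
            unfold grsA_step
            rw [hget, hsk]
            simp
          rw [hstep, ih (k + 1) _ (by simp at h ⊢; omega)]
          have hlift : pvLift (some e, x) = some (e, x) := rfl
          simp only [List.zip_cons_cons, List.filterMap_cons, hlift]
          refine congrArg₂ Prod.mk rfl ?_
          simp only [List.length_cons]
          push_cast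
          ring

-- length of the flat id table = total required staff
theorem pvIds_length (shifts : List (List (String × Int))) :
    (pvIds shifts).length
      = (shifts.map (fun s => ((PySem.Dict.ofList s).getD "required_staff" 0).toNat)).sum := by
  induction shifts with
  | nil => rfl
  | cons s rest ih =>
      simp only [pvIds, List.flatMap_cons, List.length_append, List.length_map,
        List.map_cons, List.sum_cons] at *
      rw [ih]
      simp [PySem.List.length_pyRange_one]

-- B's dedup loop = Set.update of the non-None entries
theorem emps_fold (l : List (Option Int)) (s : List Int) :
    l.foldl (fun emps e =>
        match e with
        | some v => if emps.contains v then emps else emps ++ [v]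
        | none => emps) s
      = PySem.Set.update s (l.filterMap id) := by
  induction l generalizing s with
  | nil => simp [PySem.Set.update]
  | cons e rest ih =>
      cases e with
      | none => simpa using ih s
      | some v =>
          have hadd : (if s.contains v then s else s ++ [v]) = PySem.Set.add s v := by
            rw [PySem.Set.add_eq_ite]
            by_cases hv : v ∈ s
            · rw [if_pos (List.contains_iff_mem.mpr hv), if_pos hv]
            · rw [if_neg (fun hc => hv (List.contains_iff_mem.mp hc)), if_neg hv]
          have hfm : List.filterMap id (some v :: rest) = v :: List.filterMap id rest := by simp
          rw [List.foldl_cons]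
          simp only []
          rw [hadd, ih (PySem.Set.add s v), hfm, PySem.Set.update_cons]

-- the employees seen in the first n slots are the keys of the lifted pair list
theorem take_filterMap_eq (schedule : List (Option Int)) (ids : List Int)
    (h : ids.length ≤ schedule.length) :
    (schedule.take ids.length).filterMap id
      = ((schedule.zip ids).filterMap pvLift).map (·.1) := by
  induction ids generalizing schedule with
  | nil => simp
  | cons i ids ih =>
      cases schedule with
      | nil => simp at h
      | cons a schedule =>
          simp only [List.length_cons, List.take_succ_cons, List.zip_cons_cons,
            List.filterMap_cons]
          cases a with
          | none => exact ih schedule (by simpa using h)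
          | some e =>
              simpa [pvLift] using congrArg (e :: ·) (ih schedule (by simpa using h))

-- per-employee filter over the raw zip = filter over the lifted pair list
theorem hlift_some (v x : Int) : pvLift (some v, x) = some (v, x) := rfl

theorem filter_lift_eq (zs : List (Option Int × Int)) (e : Int) :
    ((zs.filterMap pvLift).filter (·.1 == e)).map (·.2)
      = (zs.filter (fun p => p.1 == some e)).map (·.2) := by
  induction zs with
  | nil => rfl
  | cons p rest ih =>
      obtain ⟨a, x⟩ := p
      cases a with
      | none => simpa using ih
      | some v =>
          by_cases hv : v = e
          · simp only [List.filterMap_cons, hlift_some v x, List.filter_cons]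
            simp [hv]
            simpa [pvLift] using ih
          · simp only [List.filterMap_cons, hlift_some v x, List.filter_cons]
            simp [hv]
            simpa [pvLift] using ih

theorem grs_eq (schedule : List (Option Int)) (shifts : List (List (String × Int)))
    (hlen : (shifts.map (fun s => ((PySem.Dict.ofList s).getD "required_staff" 0).toNat)).sum
      ≤ schedule.length) :
    get_reconstructed_schedule schedule shifts = get_reconstructed_schedule_alt schedule shifts := by
  have hlen' : (pvIds shifts).length ≤ schedule.length := by rw [pvIds_length]; exact hlen
  unfold get_reconstructed_schedule get_reconstructed_schedule_alt
  rw [grsA_outer]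
  have h0 : ((PySem.Dict.empty : PySem.Dict Int (List Int)), (0 : Int))
      = ((PySem.Dict.empty : PySem.Dict Int (List Int)), ((0 : Nat) : Int)) := by norm_num
  rw [h0, grsA_flat schedule (pvIds shifts) 0 _ (by simpa using hlen')]
  simp only [List.drop_zero]
  set ps := ((schedule.zip (pvIds shifts)).filterMap pvLift) with hps
  have hkeys : (grsF PySem.Dict.empty ps).keys = PySem.Set.ofList (ps.map (·.1)) := by
    rw [grsF_keys]
    simp [PySem.Set.update_nil_left]
  have hnodup : (grsF PySem.Dict.empty ps).keys.Nodup := by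
    rw [hkeys]; exact PySem.Set.nodup_ofList _
  rw [PySem.Dict.items_eq_map_keys _ hnodup ([] : List Int), hkeys]
  rw [PySem.List.slice_to_natCast, emps_fold, PySem.Set.update_nil_left,
      take_filterMap_eq schedule (pvIds shifts) hlen', ← hps]
  apply List.map_congr_left
  intro e _
  rw [grsF_getD]
  simp only [PySem.Dict.getD_empty, List.nil_append]
  rw [filter_lift_eq]

-- ===== VERDICT (by name: the statement is the Claim_ definition above) =====
theorem get_reconstructed_schedule_spec : Claim_equal_get_reconstructed_schedule := by
  intro schedule shifts _ hpre
  unfold Spec_get_reconstructed_schedule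
  exact grs_eq schedule shifts hpre.2
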